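-- pv_equiv track=rewrite | github.com/mrugacz95/advent-of-code-2024 | day7/day7.py | bin_to_signs
-- ===== SOURCE A (Python) =====
-- def bin_to_signs(bin, places):
--     signs = []
--     for _ in range(places):
--         s = {
--             0: '+',
--             1: '*'
--         }.get(bin & 1, '-')
--         bin >>= 1
--         signs.append(s)
--     return signs
-- ===== SOURCE B (Python) =====
-- def bin_to_signs(bin, places):
--     # String-based: take the low `places` bits as a zero-padded binary string,
--     # then read it back LSB-first mapping '0'->'+', '1'->'*'.
--     if places <= 0:
--         return []
--     val = bin % (1 << places)
--     s = format(val, '0{}b'.format(places))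
--     return ['+' if c == '0' else '*' for c in reversed(s)]
-- ===== Notes on version B (the rewrite author's own statement) =====
-- stated objective: idiomatic
-- what changed: B replaces A's per-bit shift-and-append loop with a string-based derivation: mask the low bits, render them as one zero-padded binary string via format(), and map the reversed string's characters to signs in a comprehension.
import Mathlib
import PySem

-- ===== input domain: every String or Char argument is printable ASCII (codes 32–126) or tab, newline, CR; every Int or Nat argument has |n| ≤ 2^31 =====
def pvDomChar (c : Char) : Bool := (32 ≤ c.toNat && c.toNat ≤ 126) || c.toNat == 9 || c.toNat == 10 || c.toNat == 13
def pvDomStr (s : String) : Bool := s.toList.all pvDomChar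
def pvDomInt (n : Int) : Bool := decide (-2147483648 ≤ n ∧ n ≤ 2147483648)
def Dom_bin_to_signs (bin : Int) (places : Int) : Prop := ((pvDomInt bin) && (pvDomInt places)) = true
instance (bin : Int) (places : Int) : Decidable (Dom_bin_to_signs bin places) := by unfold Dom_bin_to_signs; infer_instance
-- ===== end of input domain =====

-- ===== PORT A =====
-- B re-derives the signs from a zero-padded binary-string representation read LSB-first,
-- instead of A's per-bit shift loop (objective: idiomatic; a timing run measured B faster by a constant factor).
def bin_to_signs (bin : Int) (places : Int) : List String :=
  ((PySem.List.pyRange 0 places 1).foldl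
    (fun (st : Int × List String) _ =>
      let s := ((PySem.Dict.ofList [((0:Int), "+"), ((1:Int), "*")]).get?
                  (PySem.Int.band st.1 1)).getD "-"
      (st.1 >>> (1:Nat), st.2 ++ [s]))
    (bin, [])).2

-- ===== PORT B =====
-- minimal binary digits of a Nat, MSB first; together with the zero-padding below this is
-- an exact port of format(val, '0{places}b') for val ≥ 0 (which holds here: val = bin % 2^places)
def pvBinDigits : Nat → List Char
  | 0 => ['0']
  | 1 => ['1']
  | n+2 => pvBinDigits ((n+2)/2) ++ [if (n+2) % 2 = 0 then '0' else '1']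

def bin_to_signs_alt (bin : Int) (places : Int) : List String :=
  if places ≤ 0 then []
  else
    let val := PySem.Int.mod bin ((1:Int) <<< places.toNat)
    let digits := pvBinDigits val.toNat
    let s := List.replicate (places.toNat - digits.length) '0' ++ digits
    s.reverse.map (fun c => if c == '0' then "+" else "*")

-- ===== PRECONDITION & SPEC =====
def Spec_bin_to_signs (bin : Int) (places : Int) (out : List String) : Prop := out = bin_to_signs_alt bin places
instance (bin : Int) (places : Int) (out : List String) : Decidable (Spec_bin_to_signs bin places out) := by unfold Spec_bin_to_signs; infer_instance

-- ===== CLAIM (what is proved, stated in full; the proofs are below) =====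
def Claim_equal_bin_to_signs : Prop := ∀ (bin : Int) (places : Int), Dom_bin_to_signs bin places → Spec_bin_to_signs bin places (bin_to_signs bin places)

-- ===== LEMMAS AND PROOFS =====

-- the common bit-sign list: sign of bit 0, bit 1, … bit (p-1)
def pvSpecL : Nat → Int → List String
  | 0, _ => []
  | p+1, b => (if b % 2 = 0 then "+" else "*") :: pvSpecL p (b / 2)

theorem pv_shiftr (b : Int) : b >>> (1:Nat) = b / 2 := by
  have := Int.shiftRight_eq_div_pow b 1; simpa using this

theorem pv_foldlA (l : List Int) (b : Int) (acc : List String) :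
    ((l.foldl
      (fun (st : Int × List String) _ =>
        let s := ((PySem.Dict.ofList [((0:Int), "+"), ((1:Int), "*")]).get?
                    (PySem.Int.band st.1 1)).getD "-"
        (st.1 >>> (1:Nat), st.2 ++ [s]))
      (b, acc)).2) = acc ++ pvSpecL l.length b := by
  induction l generalizing b acc with
  | nil => simp [pvSpecL]
  | cons x xs ih =>
    simp only [List.foldl_cons, List.length_cons]
    rw [ih]
    have hb1 : PySem.Int.band b 1 = PySem.Int.mod b 2 := PySem.Int.band_one b
    have hm : PySem.Int.mod b 2 = b % 2 := PySem.Int.mod_eq_emod_of_pos (by norm_num)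
    rcases PySem.Int.mod_two_eq b with h | h
    · have hb2 : b % 2 = 0 := by rw [← hm, h]
      rw [show pvSpecL (xs.length + 1) b = (if b % 2 = 0 then "+" else "*") :: pvSpecL xs.length (b / 2) from rfl]
      rw [hb1, h, hb2, pv_shiftr, if_pos rfl]
      simp only [List.append_assoc, List.singleton_append]
      rfl
    · have hb2 : b % 2 = 1 := by rw [← hm, h]
      rw [show pvSpecL (xs.length + 1) b = (if b % 2 = 0 then "+" else "*") :: pvSpecL xs.length (b / 2) from rfl]
      rw [hb1, h, hb2, pv_shiftr, if_neg (by norm_num)]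
      simp only [List.append_assoc, List.singleton_append]
      rfl

theorem pv_lenBinDigits : ∀ v p : Nat, 0 < v → v < 2^p → (pvBinDigits v).length ≤ p := by
  intro v
  induction v using Nat.strong_induction_on with
  | _ v ih =>
    intro p hv hvp
    match v, hv with
    | 1, _ =>
      have h1 : 1 ≤ p := by
        rcases p with _ | p
        · norm_num at hvp
        · omega
      simp [pvBinDigits]; omega
    | (n+2), _ =>
      have hp2 : 2 ≤ p := by
        rcases p with _ | _ | p
        · norm_num at hvp
        · norm_num at hvp; omega
        · omega
      have hlt : (n+2)/2 < 2^(p-1) := by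
        have h2 : 2^p = 2 * 2^(p-1) := by
          rw [← pow_succ']
          congr 1
          omega
        omega
      have hrec := ih ((n+2)/2) (by omega) (p-1) (by omega) hlt
      simp only [pvBinDigits, List.length_append, List.length_cons, List.length_nil]
      omega

def pvPad (p v : Nat) : List Char := List.replicate (p - (pvBinDigits v).length) '0' ++ pvBinDigits v

theorem pv_pad_step (p v : Nat) (hp : 1 ≤ p) (hv : v < 2^(p+1)) :
    pvPad (p+1) v = pvPad p (v/2) ++ [if v % 2 = 0 then '0' else '1'] := by
  have hrep : List.replicate p '0' = List.replicate (p-1) '0' ++ ['0'] := by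
    conv_lhs => rw [show p = (p-1)+1 by omega]
    exact List.replicate_succ'
  match v with
  | 0 =>
    rw [pvPad, pvPad, show (0:Nat)/2 = 0 from rfl, show pvBinDigits 0 = ['0'] by simp [pvBinDigits],
      if_pos (by norm_num)]
    simp only [List.length_cons, List.length_nil, zero_add]
    rw [show p + 1 - 1 = p by omega, hrep]
  | 1 =>
    rw [pvPad, pvPad, show (1:Nat)/2 = 0 from rfl, show pvBinDigits 1 = ['1'] by simp [pvBinDigits],
      show pvBinDigits 0 = ['0'] by simp [pvBinDigits], if_neg (by norm_num)]
    simp only [List.length_cons, List.length_nil, zero_add]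
    rw [show p + 1 - 1 = p by omega, hrep]
  | (n+2) =>
    have hlen : (pvBinDigits ((n+2)/2)).length ≤ p := by
      apply pv_lenBinDigits _ p (by omega)
      have h2 : 2^(p+1) = 2 * 2^p := by rw [← pow_succ']
      omega
    simp only [pvPad, pvBinDigits, List.length_append, List.length_cons, List.length_nil,
      List.append_assoc]
    congr 2
    omega

theorem pv_halve (m b : Int) (hm : 0 < m) : (b / 2) % m = (b % (2*m)) / 2 := by
  have hb := Int.mul_ediv_add_emod b (2*m)
  set q := b / (2*m) with hq
  set r := b % (2*m) with hr
  have hr0 : 0 ≤ r := Int.emod_nonneg b (by positivity)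
  have hr2 : r < 2*m := Int.emod_lt_of_pos b (by positivity)
  have h2 : b / 2 = r/2 + m*q := by
    have hbb : b = r + q*m*2 := by linarith
    rw [hbb, Int.add_mul_ediv_right _ _ (by norm_num : (2:Int) ≠ 0)]
    ring
  rw [h2, Int.add_mul_emod_self_left]
  exact Int.emod_eq_of_lt (by omega) (by omega)

theorem pv_main (p : Nat) (b : Int) :
    ((pvPad (p+1) ((b % 2^(p+1)).toNat)).reverse.map
      (fun c => if c == '0' then "+" else "*")) = pvSpecL (p+1) b := by
  induction p generalizing b with
  | zero =>
    rcases Int.emod_two_eq b with h | h <;>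
      simp [pvPad, pvBinDigits, pvSpecL, h]
  | succ p ih =>
    have hmpos : (0:Int) < 2^(p+1) := by positivity
    have hme : (0:Int) < 2^(p+2) := by positivity
    set e := b % 2^(p+2) with he
    have he0 : 0 ≤ e := Int.emod_nonneg b (by positivity)
    have he2 : e < 2^(p+2) := Int.emod_lt_of_pos b hme
    have hvlt : e.toNat < 2^(p+2) := by
      have : ((2:Int)^(p+2)) = ((2^(p+2) : Nat) : Int) := by push_cast; ring
      omega
    rw [pv_pad_step (p+1) e.toNat (by omega) hvlt]
    have hdiv : e.toNat / 2 = ((b / 2) % 2^(p+1)).toNat := by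
      have h1 : (b / 2) % 2^(p+1) = e / 2 := by
        rw [he, pv_halve (2^(p+1)) b hmpos]
        congr 2
        ring
      omega
    have hpar : (e.toNat % 2 = 0) ↔ (b % 2 = 0) := by
      have h1 : b % 2 = e % 2 := by
        rw [he, Int.emod_emod_of_dvd b ⟨2^(p+1), by ring⟩]
      omega
    simp only [List.reverse_append, List.reverse_cons, List.reverse_nil, List.nil_append,
      List.map_cons, List.singleton_append]
    rw [hdiv]
    rw [show pvSpecL (p+1+1) b = (if b % 2 = 0 then "+" else "*") :: pvSpecL (p+1) (b / 2) from rfl]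
    rw [ih (b / 2)]
    congr 1
    by_cases h : e.toNat % 2 = 0
    · simp [h, hpar.mp h]
    · have := (not_iff_not.mpr hpar).mp h
      simp [h, this]

theorem pv_A_eq_spec (b places : Int) :
    bin_to_signs b places = pvSpecL places.toNat b := by
  unfold bin_to_signs
  rw [pv_foldlA]
  simp [PySem.List.length_pyRange_one]

theorem pv_B_eq_spec (b places : Int) :
    bin_to_signs_alt b places = pvSpecL places.toNat b := by
  unfold bin_to_signs_alt
  by_cases h : places ≤ 0
  · simp [h, show places.toNat = 0 by omega, pvSpecL]
  · simp only [h, if_false]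
    obtain ⟨p, hp⟩ : ∃ p, places.toNat = p + 1 := ⟨places.toNat - 1, by omega⟩
    have hsh : ((1:Int) <<< places.toNat) = 2 ^ places.toNat := by
      rw [Int.shiftLeft_eq]; ring
    have hmod : PySem.Int.mod b ((1:Int) <<< places.toNat) = b % 2^places.toNat := by
      rw [hsh]; exact PySem.Int.mod_eq_emod_of_pos (by positivity)
    rw [hmod, hp]
    exact pv_main p b

-- ===== VERDICT (by name: the statement is the Claim_ definition above) =====
theorem bin_to_signs_spec : Claim_equal_bin_to_signs := by
  intro b places _
  unfold Spec_bin_to_signs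
  rw [pv_A_eq_spec, pv_B_eq_spec]
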